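-- pv_equiv track=rewrite | github.com/kcm0147/LeetCode | 2064-minimized-maximum-of-products-distributed-to-any-store/2064-minimized-maximum-of-products-distributed-to-any-store.py | is_distribute
-- ===== SOURCE A (Python) =====
-- from typing import List
--
-- def is_distribute(quantities: List[int], k: int, n: int) -> bool:
--     j = 0
--     remain = quantities[j]
--
--     for i in range(n):
--         if remain <= k:
--             j += 1
--             if j == len(quantities):
--                 return True
--             remain = quantities[j]
--         else:
--             remain -= k
--
--     return False
-- ===== SOURCE B (Python) =====
-- from typing import List
--
-- def is_distribute(quantities: List[int], k: int, n: int) -> bool: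
--     need = 0
--     for q in quantities:
--         if q <= k:
--             need += 1
--         elif k <= 0:
--             return False
--         else:
--             need += -(-q // k)
--     return need <= n
-- ===== Notes on version B (the rewrite author's own statement) =====
-- stated objective: alternative
-- what changed: A simulates the n stores one by one, decrementing a running remainder k at a time; B makes a single pass over quantities summing the exact number of stores each quantity needs (1 if it fits, otherwise ceil(q/k), impossible if k <= 0) and compares that total to n.
import Mathlib
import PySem

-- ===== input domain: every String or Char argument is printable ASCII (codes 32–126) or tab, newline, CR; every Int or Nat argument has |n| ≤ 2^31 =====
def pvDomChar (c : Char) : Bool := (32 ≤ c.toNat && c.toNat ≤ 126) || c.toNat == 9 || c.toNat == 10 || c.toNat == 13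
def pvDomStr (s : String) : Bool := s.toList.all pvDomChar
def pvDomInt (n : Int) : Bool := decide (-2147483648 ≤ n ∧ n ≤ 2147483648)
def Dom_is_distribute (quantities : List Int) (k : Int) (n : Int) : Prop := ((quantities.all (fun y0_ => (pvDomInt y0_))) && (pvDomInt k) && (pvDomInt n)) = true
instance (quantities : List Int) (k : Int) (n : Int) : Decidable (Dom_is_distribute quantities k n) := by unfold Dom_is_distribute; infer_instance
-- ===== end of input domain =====

-- B replaces A's store-by-store simulation by one pass over the quantities that
-- sums the number of stores each quantity needs (ceiling division) and compares to n.

-- ===== PORT A =====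
-- A's for-loop over range(n) with state (j, remain); range(n) is n iterations
-- (none for n < 0) and A's loop variable i is unused, so the fuel counts them down.
def aLoop (qs : List Int) (k : Int) : Nat → Nat → Int → Bool
  | 0, _, _ => false
  | fs + 1, j, remain =>
      if remain ≤ k then
        if j + 1 = qs.length then true
        -- quantities[j] : exact, since j+1 < qs.length was just checked
        else aLoop qs k fs (j + 1) (PySem.List.pyGetD qs ((j : Int) + 1) 0)
      else aLoop qs k fs j (remain - k)

def is_distribute (quantities : List Int) (k : Int) (n : Int) : Bool :=
  match PySem.List.pyGet? quantities 0 with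
  | none => false   -- quantities[0] raises IndexError; excluded by Pre_
  | some r => aLoop quantities k n.toNat 0 r

-- ===== PORT B =====
-- Source B's loop over quantities accumulating 'need'; none = B's early 'return False'.
def altLoop (k : Int) : List Int → Option Int
  | [] => some 0
  | q :: rest =>
      if q ≤ k then (altLoop k rest).map (· + 1)
      else if k ≤ 0 then none
      else (altLoop k rest).map (· + (-(PySem.Int.floordiv (-q) k)))

def is_distribute_alt (quantities : List Int) (k : Int) (n : Int) : Bool :=
  match altLoop k quantities with
  | none => false
  | some need => decide (need ≤ n)

-- ===== PRECONDITION & SPEC =====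
-- Pre_ excludes only the empty list, on which A raises IndexError (quantities[0]).
def Pre_is_distribute (quantities : List Int) (k : Int) (n : Int) : Prop := quantities ≠ []
instance (quantities : List Int) (k : Int) (n : Int) : Decidable (Pre_is_distribute quantities k n) := by unfold Pre_is_distribute; infer_instance
def pvWitness_is_distribute : List Int × Int × Int := ([3, 5], 2, 5)

def Spec_is_distribute (quantities : List Int) (k : Int) (n : Int) (out : Bool) : Prop := out = is_distribute_alt quantities k n
instance (quantities : List Int) (k : Int) (n : Int) (out : Bool) : Decidable (Spec_is_distribute quantities k n out) := by unfold Spec_is_distribute; infer_instance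

-- ===== CLAIM (what is proved, stated in full; the proofs are below) =====
def Claim_equal_is_distribute : Prop := ∀ (quantities : List Int) (k : Int) (n : Int), Dom_is_distribute quantities k n → Pre_is_distribute quantities k n → Spec_is_distribute quantities k n (is_distribute quantities k n)

-- ===== LEMMAS AND PROOFS =====

-- Stores needed to finish the current remainder: 1 if it fits, none (never) if k ≤ 0,
-- else ceil(remain / k).
def steps (k remain : Int) : Option Int :=
  if remain ≤ k then some 1
  else if k ≤ 0 then none
  else some (-(PySem.Int.floordiv (-remain) k))

theorem steps_pos (k r s : Int) (h : steps k r = some s) : 1 ≤ s := by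
  unfold steps at h
  split_ifs at h with h1 h2
  · simp only [Option.some.injEq] at h; omega
  · have hk : 0 < k := by omega
    have hfd : PySem.Int.floordiv (-r) k < 0 := by
      rw [PySem.Int.floordiv_lt_iff_lt_mul hk]; omega
    simp only [Option.some.injEq] at h
    omega

theorem altLoop_cons (k q : Int) (rest : List Int) :
    altLoop k (q :: rest) = (steps k q).bind (fun s => (altLoop k rest).map (· + s)) := by
  show (if q ≤ k then (altLoop k rest).map (· + 1)
        else if k ≤ 0 then none
        else (altLoop k rest).map (· + (-(PySem.Int.floordiv (-q) k)))) = _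
  unfold steps
  split_ifs <;> cases altLoop k rest <;> simp

theorem altLoop_nonneg (k : Int) (l : List Int) (m : Int) (h : altLoop k l = some m) : 0 ≤ m := by
  induction l generalizing m with
  | nil => unfold altLoop at h; simp only [Option.some.injEq] at h; omega
  | cons q rest ih =>
    rw [altLoop_cons] at h
    cases hs : steps k q with
    | none => simp [hs] at h
    | some s =>
      rw [hs] at h
      cases hr : altLoop k rest with
      | none => simp [hr] at h
      | some m0 =>
        rw [hr] at h
        simp at h
        have := ih m0 hr
        have := steps_pos k q s hs
        omega

theorem steps_sub (k r : Int) (hr : ¬ r ≤ k) (hk : ¬ k ≤ 0) :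
    steps k r = (steps k (r - k)).map (· + 1) := by
  unfold steps
  have hk' : 0 < k := by omega
  split_ifs with h1
  · -- r - k ≤ k : ceil(r/k) = 2
    simp only [Option.map_some]
    congr 1
    have : -(PySem.Int.floordiv (-r) k) = 2 := by
      rw [PySem.Int.neg_floordiv_neg_eq_iff_of_pos hk']
      constructor <;> nlinarith
    omega
  · -- r - k > k : ceil(r/k) = ceil((r-k)/k) + 1
    simp only [Option.map_some]
    congr 1
    have key : PySem.Int.floordiv (-r) k = PySem.Int.floordiv (-(r - k)) k + (-1) := by
      have := Int.add_mul_ediv_right (-(r - k)) (-1) (show k ≠ 0 by omega)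
      -- floordiv = Int.fdiv = Int.ediv for positive divisor
      rw [PySem.Int.floordiv_eq_ediv_of_pos hk', PySem.Int.floordiv_eq_ediv_of_pos hk']
      have harg : -r = -(r - k) + -1 * k := by ring
      rw [harg, this]
    omega

theorem aLoop_eq (qs : List Int) (k : Int) (fuel : Nat) (j : Nat) (remain : Int)
    (hj : j < qs.length) :
    aLoop qs k fuel j remain =
      match (steps k remain).bind (fun s => (altLoop k (qs.drop (j + 1))).map (· + s)) with
      | none => false
      | some m => decide (m ≤ (fuel : Int)) := by
  induction fuel generalizing j remain with
  | zero =>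
    unfold aLoop
    cases hs : steps k remain with
    | none => simp
    | some s =>
      cases hr : altLoop k (qs.drop (j + 1)) with
      | none => simp
      | some m0 =>
        have h1 := steps_pos k remain s hs
        have h2 := altLoop_nonneg k _ m0 hr
        simp only [Option.bind_some, Option.map_some, Nat.cast_zero]
        have hm : ¬ (m0 + s ≤ (0 : Int)) := by omega
        simp [hm]
  | succ fs ih =>
    unfold aLoop
    by_cases hrem : remain ≤ k
    · simp only [if_pos hrem]
      by_cases hend : j + 1 = qs.length
      · simp only [if_pos hend]
        have hdrop : qs.drop (j + 1) = [] := by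
          apply List.drop_eq_nil_of_le; omega
        simp only [steps, if_pos hrem, hdrop, altLoop, Option.bind_some,
          Option.map_some, zero_add, true_eq_decide_iff]
        omega
      · simp only [if_neg hend]
        have hj1 : j + 1 < qs.length := by omega
        rw [ih (j + 1) _ hj1]
        have hdrop : qs.drop (j + 1) = qs[j + 1] :: qs.drop (j + 2) :=
          List.drop_eq_getElem_cons hj1
        have hget : PySem.List.pyGetD qs ((j : Int) + 1) 0 = qs[j + 1] := by
          have : ((j : Int) + 1) = ((j + 1 : Nat) : Int) := by push_cast; ring
          rw [this, PySem.List.pyGetD_natCast, List.getD_eq_getElem qs 0 hj1]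
        rw [hget, hdrop, altLoop_cons]
        have hsteps : steps k remain = some 1 := by unfold steps; simp [hrem]
        rw [hsteps]
        cases hq : steps k qs[j + 1] with
        | none => simp
        | some s =>
          cases hr : altLoop k (qs.drop (j + 2)) with
          | none => simp
          | some m0 =>
            simp only [Option.bind_some, Option.map_some,
              Nat.cast_add, Nat.cast_one, decide_eq_decide]
            omega
    · simp only [if_neg hrem]
      by_cases hk : k ≤ 0
      · have hs : steps k remain = none := by unfold steps; simp [hrem, hk]
        have hs' : steps k (remain - k) = none := by
          unfold steps
          have : ¬ remain - k ≤ k := by omega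
          simp [this, hk]
        rw [ih j _ hj, hs, hs']
        simp
      · rw [ih j _ hj]
        have hsub := steps_sub k remain hrem hk
        cases hs' : steps k (remain - k) with
        | none => rw [hsub, hs']; simp
        | some s' =>
          rw [hsub, hs']
          cases hr : altLoop k (qs.drop (j + 1)) with
          | none => simp
          | some m0 =>
            simp only [Option.map_some, Option.bind_some,
              Nat.cast_add, Nat.cast_one, decide_eq_decide]
            omega

-- ===== VERDICT (by name: the statement is the Claim_ definition above) =====
theorem is_distribute_spec : Claim_equal_is_distribute := by
  intro qs k n _ hpre
  unfold Spec_is_distribute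
  match qs, hpre with
  | q0 :: rest, _ =>
    unfold is_distribute
    rw [PySem.List.pyGet?_zero_cons]
    show aLoop (q0 :: rest) k n.toNat 0 q0 = _
    rw [aLoop_eq (q0 :: rest) k _ 0 q0 (by simp)]
    unfold is_distribute_alt
    rw [show (q0 :: rest).drop (0 + 1) = rest from rfl, altLoop_cons]
    cases hs : steps k q0 with
    | none => simp
    | some s =>
      cases hr : altLoop k rest with
      | none => simp
      | some m0 =>
        have h1 := steps_pos k q0 s hs
        have h2 := altLoop_nonneg k _ m0 hr
        simp only [Option.bind_some, Option.map_some, decide_eq_decide]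
        omega
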